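-- pv_equiv track=rewrite | github.com/sanatonek/fairness-and-callibration | multicalib/multicalibration.py | data_matches_features
-- ===== SOURCE A (Python) =====
-- def data_matches_features(data, selected_sensitives, all_sensitives): #input data is a single row in real data
--     is_sensitive_required = dict()
--     for sensitive_feature in all_sensitives:
--         is_sensitive_required[sensitive_feature] = 0
--     for required_sensitive_feature in selected_sensitives:
--         is_sensitive_required[required_sensitive_feature] = 1
--
--     for i in range(len(data)):
--         if i in is_sensitive_required:
--             if data[i] != is_sensitive_required[i]:
--                 return False
--
--     return True
-- ===== SOURCE B (Python) =====
-- def data_matches_features(data, selected_sensitives, all_sensitives):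
--     ones = set(selected_sensitives)
--     zeros = set(all_sensitives) - ones
--     n = len(data)
--     return all(data[i] == 1 for i in ones if 0 <= i < n) and \
--            all(data[i] == 0 for i in zeros if 0 <= i < n)
-- ===== Notes on version B (the rewrite author's own statement) =====
-- stated objective: alternative
-- what changed: Instead of building a 0/1 requirement dict and scanning every data index against it, B computes the two index sets (must-be-1 = set(selected), must-be-0 = set(all) - set(selected)) and checks each set directly against the in-range data entries in two separate passes.
import Mathlib
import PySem

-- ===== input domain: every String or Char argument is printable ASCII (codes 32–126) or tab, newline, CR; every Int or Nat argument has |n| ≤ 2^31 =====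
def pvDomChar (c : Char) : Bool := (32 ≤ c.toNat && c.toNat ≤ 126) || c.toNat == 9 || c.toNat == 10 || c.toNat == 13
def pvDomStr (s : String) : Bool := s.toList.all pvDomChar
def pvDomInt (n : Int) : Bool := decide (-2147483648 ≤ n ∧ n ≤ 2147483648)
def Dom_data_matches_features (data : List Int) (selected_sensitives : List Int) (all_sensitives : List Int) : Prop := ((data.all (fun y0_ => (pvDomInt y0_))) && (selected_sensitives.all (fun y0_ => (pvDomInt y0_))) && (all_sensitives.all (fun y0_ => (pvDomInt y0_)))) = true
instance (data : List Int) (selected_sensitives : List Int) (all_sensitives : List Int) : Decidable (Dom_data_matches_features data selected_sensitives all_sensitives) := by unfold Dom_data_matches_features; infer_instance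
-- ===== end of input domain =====

-- B replaces A's 0/1 requirement dict + full data-index scan by two index sets
-- (must-be-1 = set(selected), must-be-0 = set(all) - set(selected)) checked in two
-- separate passes over the in-range indices of each set. Same cost; alternative decomposition.

-- ===== PORT A =====
-- the 'for i in range(len(data)): … return False' loop, with early return
def pvLoopA (data : List Int) (d : PySem.Dict Int Int) : List Int → Bool
  | [] => true
  | i :: rest =>
    match d.get? i with
    | some v => if PySem.List.pyGetD data i 0 ≠ v then false else pvLoopA data d rest
    | none => pvLoopA data d rest

def data_matches_features (data : List Int) (selected_sensitives : List Int) (all_sensitives : List Int) : Bool :=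
  -- is_sensitive_required = dict();  for f in all_sensitives: d[f] = 0;  for f in selected: d[f] = 1
  let d0 : PySem.Dict Int Int := all_sensitives.foldl (fun d k => d.insert k 0) PySem.Dict.empty
  let d : PySem.Dict Int Int := selected_sensitives.foldl (fun d k => d.insert k 1) d0
  -- for i in range(len(data)): if i in d and data[i] != d[i]: return False    (i always in range, so pyGetD is exact)
  pvLoopA data d (PySem.List.pyRange 0 data.length 1)

-- ===== PORT B =====
def data_matches_features_alt (data : List Int) (selected_sensitives : List Int) (all_sensitives : List Int) : Bool :=
  let ones : PySem.Set Int := PySem.Set.ofList selected_sensitives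
  let zeros : PySem.Set Int := PySem.Set.diff (PySem.Set.ofList all_sensitives) ones
  let n : Int := data.length
  -- all(data[i] == 1 for i in ones if 0 <= i < n)  (data[i] only read under the guard, so pyGetD is exact)
  (ones.all (fun i => !(decide (0 ≤ i) && decide (i < n)) || (PySem.List.pyGetD data i 0 == 1))) &&
  (zeros.all (fun i => !(decide (0 ≤ i) && decide (i < n)) || (PySem.List.pyGetD data i 0 == 0)))

-- ===== PRECONDITION & SPEC =====
def Spec_data_matches_features (data : List Int) (selected_sensitives : List Int) (all_sensitives : List Int) (out : Bool) : Prop := out = data_matches_features_alt data selected_sensitives all_sensitives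
instance (data : List Int) (selected_sensitives : List Int) (all_sensitives : List Int) (out : Bool) : Decidable (Spec_data_matches_features data selected_sensitives all_sensitives out) := by unfold Spec_data_matches_features; infer_instance

-- ===== CLAIM (what is proved, stated in full; the proofs are below) =====
def Claim_equal_data_matches_features : Prop := ∀ (data : List Int) (selected_sensitives : List Int) (all_sensitives : List Int), Dom_data_matches_features data selected_sensitives all_sensitives → Spec_data_matches_features data selected_sensitives all_sensitives (data_matches_features data selected_sensitives all_sensitives)

-- ===== LEMMAS AND PROOFS =====

-- the requirement dict built by two constant-value insert loops, characterised by lookup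
theorem pv_get_foldl_insert_const (l : List Int) (v : Int) (d0 : PySem.Dict Int Int) (k : Int) :
    (l.foldl (fun d x => d.insert x v) d0).get? k = if k ∈ l then some v else d0.get? k := by
  induction l generalizing d0 with
  | nil => simp
  | cons x xs ih =>
    simp only [List.foldl_cons, ih, List.mem_cons]
    by_cases hx : k = x
    · subst hx; simp [PySem.Dict.get?_insert_self]
    · by_cases hm : k ∈ xs <;> simp [hm, hx, PySem.Dict.get?_insert_of_ne _ _ hx]

-- A's scan loop is an 'all' over the index list
theorem pvLoopA_eq_all (data : List Int) (d : PySem.Dict Int Int) (l : List Int) :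
    pvLoopA data d l =
      l.all (fun i => match d.get? i with
                      | some v => PySem.List.pyGetD data i 0 == v
                      | none => true) := by
  induction l with
  | nil => rfl
  | cons i rest ih =>
    simp only [pvLoopA, List.all_cons, ih]
    cases h : d.get? i with
    | none => simp
    | some v =>
      by_cases he : PySem.List.pyGetD data i 0 = v <;> simp [he]

theorem data_matches_features_spec : Claim_equal_data_matches_features := by
  intro data ss as _
  unfold Spec_data_matches_features
  rw [Bool.eq_iff_iff]
  unfold data_matches_features data_matches_features_alt
  simp only [pvLoopA_eq_all, List.all_eq_true, Bool.and_eq_true,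
    PySem.List.mem_pyRange_one]
  constructor
  · rintro h
    refine ⟨fun i hi => ?_, fun i hi => ?_⟩
    · rw [PySem.Set.mem_ofList] at hi
      by_cases hg : 0 ≤ i ∧ i < (data.length : Int)
      · have := h i ⟨hg.1, hg.2⟩
        rw [pv_get_foldl_insert_const] at this
        simp [hi] at this
        simp [hg.1, hg.2, this]
      · simp only [Bool.or_eq_true, Bool.not_eq_true', Bool.and_eq_false_iff,
          decide_eq_false_iff_not]
        left
        by_cases h0 : 0 ≤ i
        · right; intro hlt; exact hg ⟨h0, hlt⟩
        · left; exact h0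
    · rw [PySem.Set.mem_diff, PySem.Set.mem_ofList, PySem.Set.mem_ofList] at hi
      by_cases hg : 0 ≤ i ∧ i < (data.length : Int)
      · have := h i ⟨hg.1, hg.2⟩
        rw [pv_get_foldl_insert_const] at this
        rw [pv_get_foldl_insert_const] at this
        simp [hi.1, hi.2] at this
        simp [hg.1, hg.2, this]
      · simp only [Bool.or_eq_true, Bool.not_eq_true', Bool.and_eq_false_iff,
          decide_eq_false_iff_not]
        left
        by_cases h0 : 0 ≤ i
        · right; intro hlt; exact hg ⟨h0, hlt⟩
        · left; exact h0
  · rintro ⟨h1, h0⟩ i ⟨hge, hlt⟩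
    rw [pv_get_foldl_insert_const, pv_get_foldl_insert_const]
    by_cases hss : i ∈ ss
    · have := h1 i (by rw [PySem.Set.mem_ofList]; exact hss)
      simp [hge, hlt] at this
      simp [hss, this]
    · by_cases has : i ∈ as
      · have := h0 i (by rw [PySem.Set.mem_diff, PySem.Set.mem_ofList, PySem.Set.mem_ofList]; exact ⟨has, hss⟩)
        simp [hge, hlt] at this
        simp [hss, has, this]
      · simp [hss, has]
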